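-- pv_equiv track=rewrite | github.com/boss9293-ops/Marketflow-v1.1 | marketflow/backend/mcp/tools/watchlist_news_context.py | _related_events_from_timeline
-- ===== SOURCE A (Python) =====
-- from typing import Any, Dict, Iterable, List
--
-- def _related_events_from_timeline(rows: Any, limit: int = 3) -> List[str]:
--     if not isinstance(rows, list):
--         return []
--     out: List[str] = []
--     for row in rows:
--         if not isinstance(row, dict):
--             continue
--         headline = str(row.get("headline") or "").strip()
--         if not headline or headline in out:
--             continue
--         out.append(headline)
--         if len(out) >= max(1, limit):
--             break
--     return out
-- ===== SOURCE B (Python) =====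
-- from typing import Any, Dict, List
--
-- def _related_events_from_timeline(rows: Any, limit: int = 3) -> List[str]:
--     if not isinstance(rows, list):
--         return []
--     # Pass 1: hash map headline -> index of its first usable occurrence.
--     first: Dict[str, int] = {}
--     for i, r in enumerate(rows):
--         h = str(r.get("headline") or "").strip() if isinstance(r, dict) else ""
--         if h and h not in first:
--             first[h] = i
--     # Pass 2: reconstruct chronological order by sorting the first-occurrence
--     # indices (correct even for an unordered map), then truncate.
--     ordered = sorted(first.items(), key=lambda kv: kv[1])
--     return [h for h, _ in ordered][:max(1, limit)]
-- ===== Notes on version B (the rewrite author's own statement) =====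
-- stated objective: alternative
-- what changed: Replaces A's single interleaved loop (manual list-membership dedup with an early break) by two staged passes: a hash map from headline to its first-occurrence index, then order reconstruction by sorting those indices and truncating.
import Mathlib
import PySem

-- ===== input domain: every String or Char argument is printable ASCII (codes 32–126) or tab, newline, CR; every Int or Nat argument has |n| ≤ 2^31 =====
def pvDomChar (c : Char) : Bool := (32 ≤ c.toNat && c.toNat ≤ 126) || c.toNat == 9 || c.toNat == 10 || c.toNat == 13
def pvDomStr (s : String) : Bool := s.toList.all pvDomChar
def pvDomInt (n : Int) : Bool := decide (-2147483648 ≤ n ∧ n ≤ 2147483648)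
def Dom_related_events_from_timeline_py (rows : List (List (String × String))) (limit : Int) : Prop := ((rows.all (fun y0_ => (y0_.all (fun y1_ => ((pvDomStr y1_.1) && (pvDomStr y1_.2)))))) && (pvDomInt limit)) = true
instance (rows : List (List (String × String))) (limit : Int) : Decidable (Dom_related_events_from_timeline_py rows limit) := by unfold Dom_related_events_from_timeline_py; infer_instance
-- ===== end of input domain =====

-- B replaces A's single interleaved dedup loop (manual `in out` membership, early break)
-- by two staged passes: a hash map headline → first-occurrence index, then an
-- order reconstruction by sorting those indices and truncating (objective: alternative).

-- ===== PORT A =====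
-- str(row.get("headline") or "").strip(): dict lookup is first match in the assoc list;
-- `or ""` maps a missing key or empty value to "" — both end as "" after strip on the "" path.
def pvClean (row : List (String × String)) : String :=
  PySem.Str.strip (((row.find? (fun p => p.1 == "headline")).map Prod.snd).getD "")

-- the `for row in rows` loop with `out` accumulator and `break` once len(out) >= max(1, limit)
def pvGoA (limit : Int) : List (List (String × String)) → List String → List String
  | [], out => out
  | row :: rest, out =>
    let headline := pvClean row
    if headline = "" ∨ headline ∈ out then pvGoA limit rest out
    else
      let out' := out ++ [headline]
      if max 1 limit ≤ (out'.length : Int) then out' else pvGoA limit rest out'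

def related_events_from_timeline_py (rows : List (List (String × String))) (limit : Int) : List String :=
  pvGoA limit rows []

-- ===== PORT B =====
-- pass 1: for i, r in enumerate(rows): h = clean(r); if h and h not in first: first[h] = i
-- pass 2: [h for h, _ in sorted(first.items(), key=lambda kv: kv[1])][:max(1, limit)]
def related_events_from_timeline_py_alt (rows : List (List (String × String))) (limit : Int) : List String :=
  let first := (PySem.List.enumerate rows).foldl
    (fun d p =>
      let h := pvClean p.2
      if h ≠ "" ∧ d.contains h = false then d.insert h p.1 else d)
    (PySem.Dict.empty : PySem.Dict String Int)
  let ordered := PySem.List.sorted first.items (fun kv => kv.2) false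
  (ordered.map Prod.fst).take (max 1 limit).toNat

-- ===== PRECONDITION & SPEC =====
def Spec_related_events_from_timeline_py (rows : List (List (String × String))) (limit : Int) (out : List String) : Prop := out = related_events_from_timeline_py_alt rows limit
instance (rows : List (List (String × String))) (limit : Int) (out : List String) : Decidable (Spec_related_events_from_timeline_py rows limit out) := by unfold Spec_related_events_from_timeline_py; infer_instance

-- ===== CLAIM =====
def Claim_equal_related_events_from_timeline_py : Prop := ∀ (rows : List (List (String × String))) (limit : Int), Dom_related_events_from_timeline_py rows limit → Spec_related_events_from_timeline_py rows limit (related_events_from_timeline_py rows limit)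

-- ===== LEMMAS AND PROOFS =====

-- order-preserving dedup of the nonempty cleaned headlines not already in seen
def pvDD : List String → List String → List String
  | [], _ => []
  | h :: t, seen => if h = "" ∨ h ∈ seen then pvDD t seen else h :: pvDD t (h :: seen)

-- the first-occurrence pairs (headline, index) produced scanning from index i
def pvF : List String → Int → List String → List (String × Int)
  | [], _, _ => []
  | h :: t, i, seen =>
    if h ≠ "" ∧ h ∉ seen then (h, i) :: pvF t (i + 1) (h :: seen) else pvF t (i + 1) seen

theorem pvDD_congr (hs : List String) : ∀ s s', (∀ x, x ∈ s ↔ x ∈ s') → pvDD hs s = pvDD hs s' := by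
  induction hs with
  | nil => intro s s' _; rfl
  | cons h t ih =>
    intro s s' hm
    simp only [pvDD, hm h]
    by_cases hc : h = "" ∨ h ∈ s'
    · simp only [hc, if_true]; exact ih s s' hm
    · simp only [hc, if_false]
      refine congrArg _ (ih _ _ ?_)
      intro x; simp [hm x]

theorem pvF_congr (hs : List String) : ∀ (i : Int) s s', (∀ x, x ∈ s ↔ x ∈ s') → pvF hs i s = pvF hs i s' := by
  induction hs with
  | nil => intro i s s' _; rfl
  | cons h t ih =>
    intro i s s' hm
    simp only [pvF]
    by_cases hc : h ≠ "" ∧ h ∉ s'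
    · have hcl : h ≠ "" ∧ h ∉ s := ⟨hc.1, fun hx => hc.2 ((hm h).mp hx)⟩
      rw [if_pos hcl, if_pos hc]
      refine congrArg _ (ih _ _ _ ?_)
      intro x; simp [hm x]
    · have hcl : ¬ (h ≠ "" ∧ h ∉ s) := by
        intro hx; exact hc ⟨hx.1, fun hy => hx.2 ((hm h).mpr hy)⟩
      rw [if_neg hcl, if_neg hc]; exact ih _ s s' hm

theorem pvGoA_eq (limit : Int) (k : Nat) (hM : max 1 limit = (k : Int)) :
    ∀ (rows : List (List (String × String))) (out : List String),
      out.length < k →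
      pvGoA limit rows out = out ++ (pvDD (rows.map pvClean) out).take (k - out.length) := by
  intro rows
  induction rows with
  | nil => intro out _; simp [pvGoA, pvDD]
  | cons row rest ih =>
    intro out hlen
    simp only [pvGoA, List.map_cons, pvDD]
    by_cases hc : pvClean row = "" ∨ pvClean row ∈ out
    · simp only [hc, if_true]
      exact ih out hlen
    · simp only [hc, if_false]
      have hlen1 : (out ++ [pvClean row]).length = out.length + 1 := by simp
      have htake : ∀ (l : List String),
          (pvClean row :: l).take (k - out.length)
            = pvClean row :: l.take (k - (out ++ [pvClean row]).length) := by
        intro l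
        have : k - out.length = (k - (out ++ [pvClean row]).length) + 1 := by
          rw [hlen1]; omega
        rw [this]; rfl
      by_cases hstop : max 1 limit ≤ ((out ++ [pvClean row]).length : Int)
      · simp only [hstop, if_true]
        rw [hM] at hstop
        have hkout : k = (out ++ [pvClean row]).length := by
          rw [hlen1] at hstop ⊢; omega
        rw [htake, hkout]
        simp
      · simp only [hstop, if_false]
        rw [hM] at hstop
        have hlt : (out ++ [pvClean row]).length < k := by
          rw [hlen1] at hstop ⊢; omega
        rw [ih (out ++ [pvClean row]) hlt, htake]
        rw [pvDD_congr (rest.map pvClean) (pvClean row :: out) (out ++ [pvClean row]) (by intro x; simp [or_comm])]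
        simp

-- pass 1's fold builds exactly the first-occurrence pairs, appended to d.items
theorem pvFold_items :
    ∀ (rows : List (List (String × String))) (i : Int) (d : PySem.Dict String Int),
      ((PySem.List.enumerate rows i).foldl
        (fun d p =>
          let h := pvClean p.2
          if h ≠ "" ∧ d.contains h = false then d.insert h p.1 else d) d).items
        = d.items ++ pvF (rows.map pvClean) i d.keys := by
  intro rows
  induction rows with
  | nil => intro i d; simp [PySem.List.enumerate_nil, pvF]
  | cons row rest ih =>
    intro i d
    rw [PySem.List.enumerate_cons]
    simp only [List.foldl_cons, List.map_cons, pvF]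
    have hctn : d.contains (pvClean row) = false ↔ pvClean row ∉ d.keys := by
      rw [← PySem.Dict.contains_iff_mem_keys]
      constructor
      · intro h hc; rw [h] at hc; exact Bool.false_ne_true hc
      · intro h; exact Bool.eq_false_iff.mpr (fun hc => h hc)
    by_cases hc : pvClean row ≠ "" ∧ pvClean row ∉ d.keys
    · have hcd : d.contains (pvClean row) = false := hctn.mpr hc.2
      rw [if_pos ⟨hc.1, hcd⟩, if_pos hc]
      rw [ih (i + 1) (d.insert (pvClean row) i)]
      rw [PySem.Dict.items_insert_of_not_contains _ _ hcd,
          PySem.Dict.keys_insert_of_not_contains _ _ hcd]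
      rw [pvF_congr (rest.map pvClean) (i + 1) (d.keys ++ [pvClean row]) (pvClean row :: d.keys)
            (by intro x; simp [or_comm])]
      simp
    · have hnd : ¬ (pvClean row ≠ "" ∧ d.contains (pvClean row) = false) := by
        intro h; exact hc ⟨h.1, hctn.mp h.2⟩
      rw [if_neg hnd, if_neg hc]
      exact ih (i + 1) d

theorem pvF_fst : ∀ (hs : List String) (i : Int) (seen : List String),
    (pvF hs i seen).map Prod.fst = pvDD hs seen := by
  intro hs
  induction hs with
  | nil => intro i seen; rfl
  | cons h t ih =>
    intro i seen
    simp only [pvF, pvDD]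
    by_cases hc : h ≠ "" ∧ h ∉ seen
    · have hD : ¬ (h = "" ∨ h ∈ seen) := by tauto
      rw [if_pos hc, if_neg hD, List.map_cons, ih]
    · have hD : h = "" ∨ h ∈ seen := by tauto
      rw [if_neg hc, if_pos hD]
      exact ih _ _

theorem pvF_lb : ∀ (hs : List String) (i : Int) (seen : List String),
    ∀ p ∈ pvF hs i seen, i ≤ p.2 := by
  intro hs
  induction hs with
  | nil => intro i seen p hp; simp [pvF] at hp
  | cons h t ih =>
    intro i seen p hp
    simp only [pvF] at hp
    by_cases hc : h ≠ "" ∧ h ∉ seen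
    · rw [if_pos hc, List.mem_cons] at hp
      rcases hp with rfl | hp
      · rfl
      · have := ih (i + 1) (h :: seen) p hp; omega
    · rw [if_neg hc] at hp
      have := ih (i + 1) seen p hp; omega

theorem pvF_pairwise : ∀ (hs : List String) (i : Int) (seen : List String),
    (pvF hs i seen).Pairwise (fun a b => a.2 < b.2) := by
  intro hs
  induction hs with
  | nil => intro i seen; simp [pvF]
  | cons h t ih =>
    intro i seen
    simp only [pvF]
    by_cases hc : h ≠ "" ∧ h ∉ seen
    · rw [if_pos hc]
      refine List.Pairwise.cons ?_ (ih _ _)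
      intro p hp
      have := pvF_lb t (i + 1) (h :: seen) p hp
      simp only; omega
    · rw [if_neg hc]; exact ih _ _

-- ===== VERDICT =====
theorem related_events_from_timeline_py_spec : Claim_equal_related_events_from_timeline_py := by
  intro rows limit _
  show pvGoA limit rows [] = related_events_from_timeline_py_alt rows limit
  unfold related_events_from_timeline_py_alt
  have h1 : (1 : Int) ≤ max 1 limit := le_max_left _ _
  have hM : max 1 limit = (((max 1 limit).toNat : Nat) : Int) := by omega
  rw [pvGoA_eq limit (max 1 limit).toNat hM rows [] (by simp)]
  simp only []
  rw [pvFold_items rows 0 PySem.Dict.empty]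
  have hitems : (PySem.Dict.empty : PySem.Dict String Int).items = [] := rfl
  have hkeys : (PySem.Dict.empty : PySem.Dict String Int).keys = [] := rfl
  rw [hitems, hkeys]
  simp only [List.nil_append]
  have hsort := PySem.List.sorted_eq_of_perm_of_pairwise_lt
      (pvF (rows.map pvClean) 0 []) (pvF (rows.map pvClean) 0 []) (fun kv => kv.2)
      (List.Perm.refl _) (pvF_pairwise (rows.map pvClean) 0 [])
  rw [hsort, pvF_fst]
  simp
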